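-- pv_equiv track=rewrite | github.com/muitiiifruckt/python | флудилка.py | prividenie_k_ravenstvam
-- ===== SOURCE A (Python) =====
-- def prividenie_k_ravenstvam(A,c,znaki):
--     for i in range(len(znaki)):
--         if znaki[i] == -1: #   <=
--             for k in range(len(A)): # добавляем новую переменную в ограничения матрицы А
--                 A[k].append(1 if k==i else 0)
--             c.append(0) # в целевую доп переменные идут с кэфом 0
--         elif znaki[i] == 1:  #  >=
--             for k in range(len(A)): # добавляем новую переменную в ограничения матрицы А
--                 A[k].append(-1 if k==i else 0)
--             c.append(0) # в целевую доп переменные идут с кэфом 0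
--         elif znaki[i] ==0: #  =
--             pass # все ок ниче не делаем
--     return A,c
-- ===== SOURCE B (Python) =====
-- def prividenie_k_ravenstvam(A, c, znaki):
--     # One pass over znaki: record, for each inequality row, where its slack
--     # variable lands (a running position counter) and with which coefficient.
--     pos = {}
--     m = 0
--     for k, z in enumerate(znaki):
--         if z == -1:
--             pos[k] = (m, 1)
--             m += 1
--         elif z == 1:
--             pos[k] = (m, -1)
--             m += 1
--     # Per row: preallocate a zero block and scatter the row's single slack
--     # coefficient by direct indexed write (no per-slack comparison scan).
--     for k, row in enumerate(A):
--         block = [0] * m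
--         if k in pos:
--             j, v = pos[k]
--             block[j] = v
--         row += block
--     c += [0] * m
--     return A, c
-- ===== Notes on version B (the rewrite author's own statement) =====
-- stated objective: alternative
-- what changed: B builds a dict mapping each inequality row to its slack position and coefficient in one pass, then extends each row with a preallocated zero block plus a single indexed scatter write (and c with m zeros), eliminating A's per-slack column-append loops and B needing no per-slack comparison per row.
import Mathlib
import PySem

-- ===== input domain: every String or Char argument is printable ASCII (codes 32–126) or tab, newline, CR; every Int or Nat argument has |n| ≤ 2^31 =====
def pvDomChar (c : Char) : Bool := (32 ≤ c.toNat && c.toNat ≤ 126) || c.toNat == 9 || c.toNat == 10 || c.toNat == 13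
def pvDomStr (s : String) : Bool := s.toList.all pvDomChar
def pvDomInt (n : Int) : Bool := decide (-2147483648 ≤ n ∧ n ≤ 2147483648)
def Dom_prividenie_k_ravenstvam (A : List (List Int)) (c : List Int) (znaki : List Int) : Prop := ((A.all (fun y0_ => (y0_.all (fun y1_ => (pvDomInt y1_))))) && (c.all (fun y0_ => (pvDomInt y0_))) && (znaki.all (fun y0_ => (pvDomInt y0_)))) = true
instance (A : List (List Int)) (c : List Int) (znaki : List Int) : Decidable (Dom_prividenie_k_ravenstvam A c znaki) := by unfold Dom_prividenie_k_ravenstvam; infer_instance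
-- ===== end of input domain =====

-- B maps each inequality row to its slack position+coefficient in one dict-building pass,
-- then extends each row with a preallocated zero block and one indexed scatter write
-- (alternative decomposition; equal return value). Both Pythons mutate A's rows and c
-- in place; the equivalence proved here is about the return value.

-- ===== PORT A =====
-- literal port of A: outer loop over range(len(znaki)); each inequality sign appends one
-- column entry to every row of A and one 0 to c.
def prividenie_k_ravenstvam (A : List (List Int)) (c : List Int) (znaki : List Int) : List (List Int) × List Int :=
  (List.range znaki.length).foldl (fun st i =>
    let z := PySem.List.pyGetD znaki (Int.ofNat i) 0
    if z = -1 then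
      (st.1.mapIdx (fun k row => row ++ [if k = i then (1 : Int) else 0]), st.2 ++ [0])
    else if z = 1 then
      (st.1.mapIdx (fun k row => row ++ [if k = i then (-1 : Int) else 0]), st.2 ++ [0])
    else st) (A, c)

-- ===== PORT B =====
-- the single pass over enumerate(znaki) building the dict `pos` and the counter m
def pvPosStep (st : PySem.Dict Int (Int × Int) × Int) (kz : Int × Int) : PySem.Dict Int (Int × Int) × Int :=
  if kz.2 = -1 then (st.1.insert kz.1 (st.2, 1), st.2 + 1)
  else if kz.2 = 1 then (st.1.insert kz.1 (st.2, -1), st.2 + 1)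
  else st

def prividenie_k_ravenstvam_alt (A : List (List Int)) (c : List Int) (znaki : List Int) : List (List Int) × List Int :=
  let st := (PySem.List.enumerate znaki).foldl pvPosStep (PySem.Dict.empty, 0)
  ((PySem.List.enumerate A).map (fun kr =>
      let block := List.replicate st.2.toNat (0 : Int)
      -- Python `block[j] = v`: j is the running counter, 0 ≤ j < m by construction
      let block := match st.1.get? kr.1 with
        | some jv => block.set jv.1.toNat jv.2
        | none => block
      kr.2 ++ block),
   c ++ List.replicate st.2.toNat 0)

-- ===== PRECONDITION & SPEC =====
def Spec_prividenie_k_ravenstvam (A : List (List Int)) (c : List Int) (znaki : List Int) (out : List (List Int) × List Int) : Prop := out = prividenie_k_ravenstvam_alt A c znaki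
instance (A : List (List Int)) (c : List Int) (znaki : List Int) (out : List (List Int) × List Int) : Decidable (Spec_prividenie_k_ravenstvam A c znaki out) := by unfold Spec_prividenie_k_ravenstvam; infer_instance

-- ===== CLAIM (what is proved, stated in full; the proofs are below) =====
def Claim_equal_prividenie_k_ravenstvam : Prop := ∀ (A : List (List Int)) (c : List Int) (znaki : List Int), Dom_prividenie_k_ravenstvam A c znaki → Spec_prividenie_k_ravenstvam A c znaki (prividenie_k_ravenstvam A c znaki)

-- ===== LEMMAS AND PROOFS =====

-- slack specification restricted to an arbitrary list of indices (proof generalisation)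
def pvSlacksOn (znaki : List Int) (l : List Nat) : List (Nat × Int) :=
  l.filterMap (fun i =>
    let z := PySem.List.pyGetD znaki (Int.ofNat i) 0
    if z = -1 then some (i, 1) else if z = 1 then some (i, -1) else none)

theorem pv_mapIdx_append (A : List (List Int)) (a : Nat → Int) (s : Nat → List Int) :
    (A.mapIdx (fun k row => row ++ [a k])).mapIdx (fun k row => row ++ s k)
      = A.mapIdx (fun k row => row ++ (a k :: s k)) := by
  apply List.ext_getElem
  · simp
  · intro i h1 h2
    simp

theorem pv_fold (znaki : List Int) (l : List Nat) (A : List (List Int)) (c : List Int) :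
    l.foldl (fun st i =>
      let z := PySem.List.pyGetD znaki (Int.ofNat i) 0
      if z = -1 then
        (st.1.mapIdx (fun k row => row ++ [if k = i then (1 : Int) else 0]), st.2 ++ [0])
      else if z = 1 then
        (st.1.mapIdx (fun k row => row ++ [if k = i then (-1 : Int) else 0]), st.2 ++ [0])
      else st) (A, c)
    = (A.mapIdx (fun k row => row ++ (pvSlacksOn znaki l).map (fun p => if k = p.1 then p.2 else 0)),
       c ++ (pvSlacksOn znaki l).map (fun _ => (0 : Int))) := by
  induction l generalizing A c with
  | nil =>
      simp [pvSlacksOn]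
      apply List.ext_getElem <;> simp
  | cons i l ih =>
      by_cases h1 : PySem.List.pyGetD znaki (Int.ofNat i) 0 = -1
      · rw [List.foldl_cons]
        norm_num [PySem.List.pyGetD] at h1
        have hstep : (let z := PySem.List.pyGetD znaki (Int.ofNat i) 0
            if z = -1 then ((A, c).1.mapIdx (fun k row => row ++ [if k = i then (1 : Int) else 0]), (A, c).2 ++ [0])
            else if z = 1 then ((A, c).1.mapIdx (fun k row => row ++ [if k = i then (-1 : Int) else 0]), (A, c).2 ++ [0])
            else (A, c)) = (A.mapIdx (fun k row => row ++ [if k = i then (1 : Int) else 0]), c ++ [0]) := by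
          norm_num [h1]
        rw [hstep]
        rw [ih, pv_mapIdx_append]
        simp [pvSlacksOn, List.filterMap_cons, h1]
      · by_cases h2 : PySem.List.pyGetD znaki (Int.ofNat i) 0 = 1
        · rw [List.foldl_cons]
          norm_num [PySem.List.pyGetD] at h1 h2
          have hstep : (let z := PySem.List.pyGetD znaki (Int.ofNat i) 0
              if z = -1 then ((A, c).1.mapIdx (fun k row => row ++ [if k = i then (1 : Int) else 0]), (A, c).2 ++ [0])
              else if z = 1 then ((A, c).1.mapIdx (fun k row => row ++ [if k = i then (-1 : Int) else 0]), (A, c).2 ++ [0])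
              else (A, c)) = (A.mapIdx (fun k row => row ++ [if k = i then (-1 : Int) else 0]), c ++ [0]) := by
            norm_num [h1, h2]
          rw [hstep]
          rw [ih, pv_mapIdx_append]
          simp [pvSlacksOn, List.filterMap_cons, h1, h2]
        · rw [List.foldl_cons]
          norm_num [PySem.List.pyGetD] at h1 h2
          have hstep : (let z := PySem.List.pyGetD znaki (Int.ofNat i) 0
              if z = -1 then ((A, c).1.mapIdx (fun k row => row ++ [if k = i then (1 : Int) else 0]), (A, c).2 ++ [0])
              else if z = 1 then ((A, c).1.mapIdx (fun k row => row ++ [if k = i then (-1 : Int) else 0]), (A, c).2 ++ [0])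
              else (A, c)) = (A, c) := by
            norm_num [h1, h2]
          rw [hstep]
          rw [ih]
          have hsl : pvSlacksOn znaki (i :: l) = pvSlacksOn znaki l := by
            simp [pvSlacksOn, List.filterMap_cons, h1, h2]
          rw [hsl]

-- pyGetD at a Nat index is List.getD
theorem pv_pyGetD_ofNat (xs : List Int) (n : Nat) :
    PySem.List.pyGetD xs (Int.ofNat n) 0 = xs.getD n 0 :=
  PySem.List.pyGetD_natCast xs n 0

-- pointwise congruence for filterMap
theorem pv_filterMap_congr {α β : Type} (l : List α) (f g : α → Option β)
    (h : ∀ a ∈ l, f a = g a) : l.filterMap f = l.filterMap g := by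
  induction l with
  | nil => rfl
  | cons a l ih =>
      rw [List.filterMap_cons, List.filterMap_cons, h a (by simp),
        ih (fun x hx => h x (by simp [hx]))]

-- the per-index slack decision, in List.getD form
def slq (zs : List Int) (i : Nat) : Option (Nat × Int) :=
  if zs.getD i 0 = -1 then some (i, 1) else if zs.getD i 0 = 1 then some (i, -1) else none

theorem pvSlacksOn_eq_slq (znaki : List Int) (l : List Nat) :
    pvSlacksOn znaki l = l.filterMap (slq znaki) := by
  unfold pvSlacksOn
  apply pv_filterMap_congr
  intro i _
  simp only [slq, pv_pyGetD_ofNat]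

-- structural slack list: (row index, coefficient) of each inequality
def slks : List Int → List (Nat × Int)
  | [] => []
  | z :: zs =>
      (if z = -1 then [((0 : Nat), (1 : Int))] else if z = 1 then [((0 : Nat), (-1 : Int))] else [])
        ++ (slks zs).map (fun p => (p.1 + 1, p.2))

theorem slq_shift (z : Int) (zs : List Int) (l : List Nat) :
    (l.map (· + 1)).filterMap (slq (z :: zs))
      = (l.filterMap (slq zs)).map (fun p => (p.1 + 1, p.2)) := by
  rw [List.filterMap_map, List.map_filterMap]
  apply pv_filterMap_congr
  intro i _
  show slq (z :: zs) (i + 1) = (slq zs i).map (fun p => (p.1 + 1, p.2))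
  unfold slq
  rw [List.getD_cons_succ]
  by_cases h1 : zs.getD i 0 = -1
  · rw [if_pos h1, if_pos h1]; rfl
  · by_cases h2 : zs.getD i 0 = 1
    · rw [if_neg h1, if_neg h1, if_pos h2, if_pos h2]; rfl
    · rw [if_neg h1, if_neg h1, if_neg h2, if_neg h2]; rfl

theorem slq_range (znaki : List Int) :
    (List.range znaki.length).filterMap (slq znaki) = slks znaki := by
  induction znaki with
  | nil => simp [slks]
  | cons z zs ih =>
      have hr : List.range (z :: zs).length = 0 :: (List.range zs.length).map (· + 1) := by
        simp [List.range_succ_eq_map]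
      rw [hr, List.filterMap_cons, slq_shift, ih]
      have h0 : slq (z :: zs) 0
          = if z = -1 then some ((0 : Nat), (1 : Int)) else if z = 1 then some ((0 : Nat), (-1 : Int)) else none := by
        unfold slq
        rw [List.getD_cons_zero]
      rw [h0]
      by_cases h1 : z = -1
      · rw [if_pos h1]; simp [slks, h1]
      · by_cases h2 : z = 1
        · rw [if_neg h1, if_pos h2]; simp [slks, h1, h2]
        · rw [if_neg h1, if_neg h2]; simp [slks, h1, h2]

-- keys of slks are strictly increasing
theorem slks_key_pos (zs : List Int) (q : Nat × Int)
    (hq : q ∈ (slks zs).map (fun p => (p.1 + 1, p.2))) : 0 < q.1 := by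
  rcases List.mem_map.1 hq with ⟨p, _, rfl⟩
  omega

theorem slks_pairwise (zs : List Int) : (slks zs).Pairwise (fun p q => p.1 < q.1) := by
  induction zs with
  | nil => simp [slks]
  | cons z zs ih =>
      have hmap : ((slks zs).map (fun p => (p.1 + 1, p.2))).Pairwise (fun p q => p.1 < q.1) := by
        rw [List.pairwise_map]
        refine ih.imp ?_
        intro a b h
        omega
      by_cases h1 : z = -1
      · have hsl : slks (z :: zs) = ((0 : Nat), (1 : Int)) :: (slks zs).map (fun p => (p.1 + 1, p.2)) := by
          simp [slks, h1]
        rw [hsl, List.pairwise_cons]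
        exact ⟨fun q hq => slks_key_pos zs q hq, hmap⟩
      · by_cases h2 : z = 1
        · have hsl : slks (z :: zs) = ((0 : Nat), (-1 : Int)) :: (slks zs).map (fun p => (p.1 + 1, p.2)) := by
            simp [slks, h1, h2]
          rw [hsl, List.pairwise_cons]
          exact ⟨fun q hq => slks_key_pos zs q hq, hmap⟩
        · have hsl : slks (z :: zs) = (slks zs).map (fun p => (p.1 + 1, p.2)) := by
            simp [slks, h1, h2]
          rw [hsl]
          exact hmap

-- position list: what the dict fold appends — (key, (position, coefficient))
def pw (S : List (Nat × Int)) (s n : Int) : List (Int × (Int × Int)) :=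
  S.mapIdx (fun j p => ((s + (p.1 : Int)), ((n + (j : Int)), p.2)))

theorem pw_cons (q : Nat × Int) (S : List (Nat × Int)) (s n : Int) :
    pw (q :: S) s n = (s + (q.1 : Int), (n, q.2)) :: pw S s (n + 1) := by
  apply List.ext_getElem
  · simp [pw]
  · intro i h1 h2
    cases i with
    | zero => simp [pw]
    | succ t =>
        simp only [pw, List.getElem_cons_succ, List.getElem_mapIdx, Prod.mk.injEq]
        and_intros <;> first | rfl | (push_cast; try ring)

theorem pw_shift (S : List (Nat × Int)) (s n : Int) :
    pw (S.map (fun p => (p.1 + 1, p.2))) s n = pw S (s + 1) n := by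
  apply List.ext_getElem
  · simp [pw]
  · intro i h1 h2
    simp only [pw, List.getElem_mapIdx, List.getElem_map, Prod.mk.injEq]
    and_intros <;> first | rfl | (push_cast; try ring)

theorem pvPos_fold (znaki : List Int) (s : Int) (d : PySem.Dict Int (Int × Int)) (n : Int)
    (hfresh : ∀ k : Int, d.contains k = true → k < s) :
    (PySem.List.enumerate znaki s).foldl pvPosStep (d, n)
      = (PySem.Dict.mk (d.items ++ pw (slks znaki) s n), n + ((slks znaki).length : Int)) := by
  induction znaki generalizing s d n with
  | nil =>
      simp only [PySem.List.enumerate_nil, List.foldl_nil, slks, pw, List.mapIdx_nil,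
        List.append_nil, List.length_nil, Nat.cast_zero, add_zero]
  | cons z zs ih =>
      rw [PySem.List.enumerate_cons, List.foldl_cons]
      have hc : d.contains s = false := by
        cases h : d.contains s with
        | false => rfl
        | true => exact absurd (hfresh s h) (lt_irrefl s)
      by_cases h1 : z = -1
      · have hstep : pvPosStep (d, n) (s, z) = (d.insert s (n, 1), n + 1) := by
          simp [pvPosStep, h1]
        rw [hstep]
        have hfresh' : ∀ k : Int, (d.insert s (n, 1)).contains k = true → k < s + 1 := by
          intro k hk
          rw [PySem.Dict.contains_insert] at hk
          have h' : k = s ∨ d.contains k = true := by simpa using hk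
          rcases h' with rfl | h'
          · omega
          · exact lt_trans (hfresh k h') (by omega)
        rw [ih (s + 1) (d.insert s (n, 1)) (n + 1) hfresh']
        rw [PySem.Dict.items_insert_of_not_contains _ _ hc]
        have hsl : slks (z :: zs) = ((0 : Nat), (1 : Int)) :: (slks zs).map (fun p => (p.1 + 1, p.2)) := by
          simp [slks, h1]
        rw [hsl, pw_cons, pw_shift]
        refine Prod.ext ?_ ?_
        · apply PySem.Dict.ext
          simp
        · simp only [List.length_cons, List.length_map]
          omega
      · by_cases h2 : z = 1
        · have hstep : pvPosStep (d, n) (s, z) = (d.insert s (n, -1), n + 1) := by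
            simp [pvPosStep, h1, h2]
          rw [hstep]
          have hfresh' : ∀ k : Int, (d.insert s (n, -1)).contains k = true → k < s + 1 := by
            intro k hk
            rw [PySem.Dict.contains_insert] at hk
            have h' : k = s ∨ d.contains k = true := by simpa using hk
            rcases h' with rfl | h'
            · omega
            · exact lt_trans (hfresh k h') (by omega)
          rw [ih (s + 1) (d.insert s (n, -1)) (n + 1) hfresh']
          rw [PySem.Dict.items_insert_of_not_contains _ _ hc]
          have hsl : slks (z :: zs) = ((0 : Nat), (-1 : Int)) :: (slks zs).map (fun p => (p.1 + 1, p.2)) := by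
            simp [slks, h1, h2]
          rw [hsl, pw_cons, pw_shift]
          refine Prod.ext ?_ ?_
          · apply PySem.Dict.ext
            simp
          · simp only [List.length_cons, List.length_map]
            omega
        · have hstep : pvPosStep (d, n) (s, z) = (d, n) := by
            simp [pvPosStep, h1, h2]
          rw [hstep]
          have hfresh' : ∀ k : Int, d.contains k = true → k < s + 1 := by
            intro k hk
            exact lt_trans (hfresh k hk) (by omega)
          rw [ih (s + 1) d n hfresh']
          have hsl : slks (z :: zs) = (slks zs).map (fun p => (p.1 + 1, p.2)) := by
            simp [slks, h1, h2]
          rw [hsl, pw_shift]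
          simp

theorem pv_block (S : List (Nat × Int)) (hlt : S.Pairwise (fun p q => p.1 < q.1)) (k : Nat)
    (m : Nat) (hm : m = S.length) :
    (match (PySem.Dict.mk (pw S 0 0)).get? ((k : Nat) : Int) with
      | some jv => (List.replicate m (0 : Int)).set jv.1.toNat jv.2
      | none => List.replicate m (0 : Int))
    = S.map (fun p => if k = p.1 then p.2 else 0) := by
  subst hm
  have hkeys : (PySem.Dict.mk (pw S 0 0)).keys = S.map (fun p => ((p.1 : Nat) : Int)) := by
    simp only [PySem.Dict.keys]
    apply List.ext_getElem
    · simp [pw]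
    · intro i h1 h2
      simp [pw]
  have hnodup : (PySem.Dict.mk (pw S 0 0)).keys.Nodup := by
    rw [hkeys]
    have h2 : (S.map (fun p => ((p.1 : Nat) : Int))).Pairwise (fun a b => a ≠ b) := by
      rw [List.pairwise_map]
      refine hlt.imp ?_
      intro a b h hc
      have : a.1 = b.1 := by exact_mod_cast hc
      omega
    exact h2
  by_cases hk : k ∈ S.map Prod.fst
  · rcases List.mem_iff_getElem.1 hk with ⟨j, hj, hjk⟩
    simp only [List.length_map] at hj
    simp only [List.getElem_map] at hjk
    have hb : j < (pw S 0 0).length := by simpa [pw] using hj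
    have hpj : (pw S 0 0)[j]'hb = (((k : Nat) : Int), ((j : Int), S[j].2)) := by
      simp [pw, hjk]
    have hmem : ((((k : Nat) : Int)), ((j : Int), S[j].2)) ∈ pw S 0 0 := by
      rw [← hpj]
      exact List.getElem_mem _
    have hget : (PySem.Dict.mk (pw S 0 0)).get? ((k : Nat) : Int) = some ((j : Int), S[j].2) :=
      PySem.Dict.get?_of_mem_items _ hmem hnodup
    rw [hget]
    show (List.replicate S.length (0 : Int)).set ((j : Int)).toNat S[j].2
        = S.map (fun p => if k = p.1 then p.2 else 0)
    rw [Int.toNat_natCast]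
    apply List.ext_getElem
    · simp
    · intro t h1 h2
      simp only [List.length_set, List.length_replicate] at h1
      rw [List.getElem_set]
      simp only [List.getElem_map, List.getElem_replicate]
      have hp := (List.pairwise_iff_getElem).1 hlt
      by_cases ht : j = t
      · subst ht
        simp [hjk]
      · have hne : S[t].1 ≠ k := by
          rcases Nat.lt_or_ge t j with h | h
          · have := hp t j (by omega) (by omega) (by omega)
            omega
          · have := hp j t (by omega) h1 (by omega)
            omega
        rw [if_neg ht, if_neg (fun hc => hne hc.symm)]
  · have hget : (PySem.Dict.mk (pw S 0 0)).get? ((k : Nat) : Int) = none := by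
      rw [PySem.Dict.get?_eq_none_iff_not_mem_keys, hkeys]
      intro hc
      rcases List.mem_map.1 hc with ⟨p, hp, hpk⟩
      have hp1 : p.1 = k := by
        have h' := hpk
        omega
      exact hk (List.mem_map.2 ⟨p, hp, hp1⟩)
    rw [hget]
    show List.replicate S.length (0 : Int) = S.map (fun p => if k = p.1 then p.2 else 0)
    apply List.ext_getElem
    · simp
    · intro t h1 h2
      have ht : t < S.length := by simpa using h2
      simp only [List.getElem_replicate, List.getElem_map]
      have hne : (S[t]'ht).1 ≠ k := by
        intro hc
        exact hk (List.mem_map.2 ⟨S[t]'ht, List.getElem_mem _, hc⟩)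
      rw [if_neg (fun hc => hne hc.symm)]

-- (PySem.List.enumerate A).map g processes exactly the (index, row) pairs of A
theorem pv_enum_map (A : List (List Int)) (g : Int × List Int → List Int) :
    (PySem.List.enumerate A).map g = A.mapIdx (fun k row => g ((k : Int), row)) := by
  apply List.ext_getElem
  · simp [PySem.List.length_enumerate]
  · intro i h1 h2
    simp only [List.getElem_map, List.getElem_mapIdx]
    rw [PySem.List.getElem_enumerate]
    simp

-- ===== VERDICT (by name: the statement is the Claim_ definition above) =====
theorem prividenie_k_ravenstvam_spec : Claim_equal_prividenie_k_ravenstvam := by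
  intro A c znaki _
  unfold Spec_prividenie_k_ravenstvam prividenie_k_ravenstvam prividenie_k_ravenstvam_alt
  rw [pv_fold znaki (List.range znaki.length) A c, pvSlacksOn_eq_slq, slq_range]
  have hpos := pvPos_fold znaki 0 PySem.Dict.empty 0 (by
    intro k hk
    simp [PySem.Dict.contains_empty] at hk)
  rw [hpos]
  have hitems : (PySem.Dict.empty : PySem.Dict Int (Int × Int)).items = [] := rfl
  rw [hitems, List.nil_append]
  simp only []
  refine Prod.ext ?_ ?_
  · simp only []
    rw [pv_enum_map]
    apply List.ext_getElem
    · simp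
    · intro i h1 h2
      simp only [List.getElem_mapIdx]
      have hb := pv_block (slks znaki) (slks_pairwise znaki) i
        (((0 : Int) + ((slks znaki).length : Int)).toNat) (by omega)
      rw [← hb]
  · simp only []
    have hm2 : (((0 : Int) + ((slks znaki).length : Int)).toNat) = (slks znaki).length := by
      omega
    rw [hm2, ← List.map_const']
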